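-- pv_equiv track=rewrite | github.com/FilyCode/database_id_mappings | query-protein-interactions-from-biogrid.py | check_for_interaction
-- ===== SOURCE A (Python) =====
-- from typing import Set, Dict, List, Tuple
--
-- def check_for_interaction(uniprot_ids_str: str, primary_set: Set[str], secondary_set: Set[str]) -> str:
--     """
--     Checks if a protein (identified by its UniProt IDs) is a primary or secondary interactor.
--     Prioritizes 'primary' if it matches both.
--     """
--     if not uniprot_ids_str.strip():
--         return 'no interaction'
--
--     current_protein_uniprot_ids = set(uid.strip() for uid in uniprot_ids_str.split(',') if uid.strip())
--
--     if current_protein_uniprot_ids.intersection(primary_set):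
--         return 'primary'
--     elif current_protein_uniprot_ids.intersection(secondary_set):
--         return 'secondary'
--     else:
--         return 'no interaction'
-- ===== SOURCE B (Python) =====
-- def check_for_interaction(uniprot_ids_str: str, primary_set, secondary_set) -> str:
--     """One short-circuiting pass over the comma-separated tokens: return 'primary'
--     on the first primary hit, remember secondary hits in a flag, no set is built."""
--     found_secondary = False
--     for uid in uniprot_ids_str.split(','):
--         tok = uid.strip()
--         if not tok:
--             continue
--         if tok in primary_set:
--             return 'primary'
--         if tok in secondary_set:
--             found_secondary = True
--     return 'secondary' if found_secondary else 'no interaction'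
-- ===== Notes on version B (the rewrite author's own statement) =====
-- stated objective: alternative
-- what changed: Replaced the build-a-set-then-two-intersections structure by a single short-circuiting pass over the split tokens with a found-secondary flag (the leading all-blank guard disappears: an all-blank string yields no tokens).
import Mathlib
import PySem

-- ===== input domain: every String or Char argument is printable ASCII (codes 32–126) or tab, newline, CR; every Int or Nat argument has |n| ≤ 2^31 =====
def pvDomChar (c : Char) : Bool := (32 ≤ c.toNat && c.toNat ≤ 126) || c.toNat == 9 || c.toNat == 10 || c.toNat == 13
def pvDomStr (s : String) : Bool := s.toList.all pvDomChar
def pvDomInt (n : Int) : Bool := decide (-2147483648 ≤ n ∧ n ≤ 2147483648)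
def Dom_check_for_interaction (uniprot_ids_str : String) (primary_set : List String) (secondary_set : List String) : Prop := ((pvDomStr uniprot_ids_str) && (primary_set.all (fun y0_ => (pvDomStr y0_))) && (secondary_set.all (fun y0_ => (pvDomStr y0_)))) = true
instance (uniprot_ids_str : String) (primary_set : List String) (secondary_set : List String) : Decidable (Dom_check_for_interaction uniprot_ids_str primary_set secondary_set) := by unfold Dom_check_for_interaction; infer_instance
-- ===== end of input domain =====

-- B replaces A's set construction and two intersection calls by one short-circuiting
-- pass over the split tokens with a found-secondary flag (objective: alternative).

-- ===== PORT A =====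
-- A: guard on blank input; build the set of stripped non-empty tokens; two intersections.
def check_for_interaction (uniprot_ids_str : String) (primary_set : List String) (secondary_set : List String) : String :=
  if PySem.Str.strip uniprot_ids_str = "" then "no interaction"
  else
    let current_protein_uniprot_ids : PySem.Set String :=
      PySem.Set.ofList
        ((((PySem.Chars.splitOn uniprot_ids_str.toList [',']).map String.ofList).map
            PySem.Str.strip).filter (fun u => u ≠ ""))
    if PySem.Set.inter current_protein_uniprot_ids primary_set ≠ [] then "primary"
    else if PySem.Set.inter current_protein_uniprot_ids secondary_set ≠ [] then "secondary"
    else "no interaction"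

-- ===== PORT B =====
-- B: one pass over the raw tokens; first primary hit returns, secondary hits set a flag.
def altGo (primary_set secondary_set : List String) (found : Bool) : List String → String
  | [] => if found then "secondary" else "no interaction"
  | uid :: rest =>
    let tok := PySem.Str.strip uid
    if tok = "" then altGo primary_set secondary_set found rest
    else if tok ∈ primary_set then "primary"
    else altGo primary_set secondary_set (found || decide (tok ∈ secondary_set)) rest

def check_for_interaction_alt (uniprot_ids_str : String) (primary_set : List String) (secondary_set : List String) : String :=
  altGo primary_set secondary_set false
    ((PySem.Chars.splitOn uniprot_ids_str.toList [',']).map String.ofList)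

-- ===== PRECONDITION & SPEC =====
def Spec_check_for_interaction (uniprot_ids_str : String) (primary_set : List String) (secondary_set : List String) (out : String) : Prop := out = check_for_interaction_alt uniprot_ids_str primary_set secondary_set
instance (uniprot_ids_str : String) (primary_set : List String) (secondary_set : List String) (out : String) : Decidable (Spec_check_for_interaction uniprot_ids_str primary_set secondary_set out) := by unfold Spec_check_for_interaction; infer_instance

-- ===== CLAIM (what is proved, stated in full; the proofs are below) =====
def Claim_equal_check_for_interaction : Prop := ∀ (uniprot_ids_str : String) (primary_set : List String) (secondary_set : List String), Dom_check_for_interaction uniprot_ids_str primary_set secondary_set → Spec_check_for_interaction uniprot_ids_str primary_set secondary_set (check_for_interaction uniprot_ids_str primary_set secondary_set)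

-- ===== LEMMAS AND PROOFS =====

-- every character of every piece produced by splitOn.go comes from l, cur or acc
theorem go_chars (sep : List Char) (fuel : Nat) (l cur : List Char) (acc : List (List Char))
    (p : List Char) (c : Char) (hp : p ∈ PySem.Chars.splitOn.go sep fuel l cur acc)
    (hc : c ∈ p) : c ∈ l ∨ c ∈ cur ∨ ∃ q ∈ acc, c ∈ q := by
  induction fuel generalizing l cur acc with
  | zero =>
    rw [PySem.Chars.splitOn.go.eq_def] at hp
    simp only [List.mem_reverse, List.mem_cons] at hp
    rcases hp with h | h
    · subst h; rcases List.mem_append.mp hc with h | h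
      · right; left; simpa using h
      · left; exact h
    · right; right; exact ⟨p, h, hc⟩
  | succ fuel ih =>
    rw [PySem.Chars.splitOn.go.eq_def] at hp
    cases l with
    | nil =>
      simp only [List.mem_reverse, List.mem_cons] at hp
      rcases hp with h | h
      · subst h; right; left; simpa using hc
      · right; right; exact ⟨p, h, hc⟩
    | cons ch rest =>
      simp only at hp
      split at hp
      · rcases ih _ _ _ hp with h | h | ⟨q, hq, hcq⟩
        · left; exact List.mem_of_mem_drop h
        · simp at h
        · rcases List.mem_cons.mp hq with h | h
          · subst h; right; left; simpa using hcq
          · right; right; exact ⟨q, h, hcq⟩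
      · rcases ih _ _ _ hp with h | h | hq
        · left; exact List.mem_cons_of_mem _ h
        · rcases List.mem_cons.mp h with h | h
          · left; simp [h]
          · right; left; exact h
        · right; right; exact hq

theorem chars_of_splitOn (s sep : List Char) (p : List Char) (hp : p ∈ PySem.Chars.splitOn s sep)
    (c : Char) (hc : c ∈ p) : c ∈ s := by
  have := go_chars sep (s.length + 1) s [] [] p c hp hc
  simpa using this

theorem strip_eq_nil_iff_all (s : List Char) :
    PySem.Chars.strip s = [] ↔ ∀ c ∈ s, PySem.Chars.isspace c = true := by
  unfold PySem.Chars.strip PySem.Chars.rstrip PySem.Chars.lstrip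
  constructor
  · intro h c hc
    rw [← List.takeWhile_append_dropWhile (p := PySem.Chars.isspace) (l := s)] at hc
    rcases List.mem_append.mp hc with h1 | h1
    · exact List.mem_takeWhile_imp h1
    · have : ∀ x ∈ (List.dropWhile PySem.Chars.isspace s).reverse, PySem.Chars.isspace x = true := by
        have := List.dropWhile_eq_nil_iff.mp (List.reverse_eq_nil_iff.mp
          (by simpa using congrArg List.reverse h))
        simpa using this
      exact this c (List.mem_reverse.mpr h1)
  · intro h
    have h1 : List.dropWhile PySem.Chars.isspace s = [] :=
      List.dropWhile_eq_nil_iff.mpr h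
    simp [h1]

-- B's loop as a two-membership-tests summary of the remaining tokens
theorem altGo_eq (ps ss : List String) (found : Bool) (l : List String) :
    altGo ps ss found l =
      if (l.any fun u => decide (PySem.Str.strip u ≠ "") && decide (PySem.Str.strip u ∈ ps)) = true
        then "primary"
      else if (found || l.any fun u => decide (PySem.Str.strip u ≠ "") && decide (PySem.Str.strip u ∈ ss)) = true
        then "secondary"
      else "no interaction" := by
  induction l generalizing found with
  | nil => simp [altGo]
  | cons u rest ih =>
    simp only [altGo, List.any_cons]
    by_cases h0 : PySem.Str.strip u = ""
    · simp [h0, ih]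
    · by_cases h1 : PySem.Str.strip u ∈ ps
      · simp [h0, h1]
      · by_cases h2 : PySem.Str.strip u ∈ ss
        · simp [h0, h1, h2, ih]
        · simp [h0, h1, h2, ih]

-- intersection with the deduplicated token set is an existence test over the raw tokens
theorem inter_ne_nil_iff (l : List String) (t : List String) :
    PySem.Set.inter
        (PySem.Set.ofList ((l.map PySem.Str.strip).filter (fun u => u ≠ ""))) t ≠ [] ↔
      (l.any fun u => decide (PySem.Str.strip u ≠ "") && decide (PySem.Str.strip u ∈ t)) = true := by
  unfold PySem.Set.inter
  rw [ne_eq, List.filter_eq_nil_iff]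
  simp only [PySem.Set.contains_eq_listContains, List.contains_iff_mem, PySem.Set.mem_ofList,
    List.mem_filter, List.mem_map, List.any_eq_true, Bool.and_eq_true, decide_eq_true_eq,
    not_forall, not_not]
  constructor
  · rintro ⟨a, ⟨⟨u, hu, rfl⟩, hne⟩, hta⟩
    exact ⟨u, hu, by simpa using hne, hta⟩
  · rintro ⟨u, hu, hne, hmem⟩
    exact ⟨PySem.Str.strip u, ⟨⟨u, hu, rfl⟩, by simpa using hne⟩, hmem⟩

-- ===== VERDICT (by name: the statement is the Claim_ definition above) =====
theorem check_for_interaction_spec : Claim_equal_check_for_interaction := by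
  intro s ps ss _
  unfold Spec_check_for_interaction check_for_interaction check_for_interaction_alt
  set l := (PySem.Chars.splitOn s.toList [',']).map String.ofList with hl
  rw [altGo_eq]
  by_cases hblank : PySem.Str.strip s = ""
  · rw [if_pos hblank]
    have hall : ∀ c ∈ s.toList, PySem.Chars.isspace c = true := by
      refine (strip_eq_nil_iff_all s.toList).mp ?_
      rw [← PySem.Str.toList_strip, hblank]; rfl
    have htok : ∀ u ∈ l, PySem.Str.strip u = "" := by
      intro u hu
      rcases List.mem_map.mp hu with ⟨p, hp, rfl⟩
      have hps : PySem.Chars.strip p = [] := by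
        refine (strip_eq_nil_iff_all p).mpr ?_
        intro c hc
        exact hall c (chars_of_splitOn s.toList [','] p hp c hc)
      exact String.ext (by rw [PySem.Str.toList_strip, String.toList_ofList, hps]; rfl)
    have hany : ∀ t : List String,
        (l.any fun u => decide (PySem.Str.strip u ≠ "") && decide (PySem.Str.strip u ∈ t)) = false := by
      intro t
      simp only [List.any_eq_false]
      intro u hu
      simp [htok u hu]
    rw [if_neg (by rw [hany ps]; simp), if_neg (by rw [Bool.false_or, hany ss]; simp)]
  · rw [if_neg hblank]
    by_cases hp : (l.any fun u => decide (PySem.Str.strip u ≠ "") && decide (PySem.Str.strip u ∈ ps)) = true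
    · rw [if_pos ((inter_ne_nil_iff l ps).mpr hp), if_pos hp]
    · rw [if_neg (fun h => hp ((inter_ne_nil_iff l ps).mp h)), if_neg hp]
      by_cases hs : (l.any fun u => decide (PySem.Str.strip u ≠ "") && decide (PySem.Str.strip u ∈ ss)) = true
      · rw [if_pos ((inter_ne_nil_iff l ss).mpr hs), if_pos (by rw [Bool.false_or]; exact hs)]
      · rw [if_neg (fun h => hs ((inter_ne_nil_iff l ss).mp h)),
            if_neg (by rw [Bool.false_or]; exact hs)]
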